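-- pv_equiv track=rewrite | github.com/CodeFreddy/LME-Testing | src/lme_testing/mvp_document_readiness.py | _missing_content_expectations
-- ===== SOURCE A (Python) =====
-- def _missing_content_expectations(text: str | None, expectation_groups: dict[str, tuple[str, ...]]) -> list[str]:
--     if text is None:
--         return ["utf8_text_source"]
--     normalized = text.casefold()
--     missing = []
--     for expectation, keywords in expectation_groups.items():
--         if not any(keyword.casefold() in normalized for keyword in keywords):
--             missing.append(expectation)
--     return sorted(missing)
-- ===== SOURCE B (Python) =====
-- def _missing_content_expectations(text, expectation_groups):
--     # Inverted index: map each distinct casefolded keyword to the groups that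
--     # contain it, test every distinct keyword against the text ONCE, collect
--     # the satisfied groups in a set, and return the sorted set difference.
--     if text is None:
--         return ["utf8_text_source"]
--     low = text.casefold()
--     groups_by_kw = {}
--     for name, keywords in expectation_groups.items():
--         for kw in keywords:
--             groups_by_kw.setdefault(kw.casefold(), []).append(name)
--     satisfied = set()
--     for kw, names in groups_by_kw.items():
--         if kw in low:
--             satisfied.update(names)
--     return sorted(set(expectation_groups) - satisfied)
-- ===== Notes on version B (the rewrite author's own statement) =====
-- stated objective: alternative
-- what changed: B replaces A's per-group any-scan with an inverted keyword-to-groups index built in one pass: each distinct casefolded keyword is searched in the text once, matched groups are accumulated in a 'satisfied' set, and the answer is the sorted set difference of all group names minus the satisfied ones.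
import Mathlib
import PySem

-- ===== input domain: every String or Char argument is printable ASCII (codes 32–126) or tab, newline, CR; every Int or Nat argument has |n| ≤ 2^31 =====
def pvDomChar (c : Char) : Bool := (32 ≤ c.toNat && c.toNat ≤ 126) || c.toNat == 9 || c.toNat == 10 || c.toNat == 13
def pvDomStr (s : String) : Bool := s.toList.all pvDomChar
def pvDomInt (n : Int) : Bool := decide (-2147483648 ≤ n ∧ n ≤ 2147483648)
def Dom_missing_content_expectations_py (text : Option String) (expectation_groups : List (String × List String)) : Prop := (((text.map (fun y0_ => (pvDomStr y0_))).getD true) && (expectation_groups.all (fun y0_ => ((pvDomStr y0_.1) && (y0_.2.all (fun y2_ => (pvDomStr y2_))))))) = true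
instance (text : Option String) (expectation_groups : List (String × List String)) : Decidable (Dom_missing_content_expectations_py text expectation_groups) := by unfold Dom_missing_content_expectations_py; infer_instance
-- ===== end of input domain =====

-- B replaces A's per-group any-scan with an inverted keyword→groups index: each distinct
-- casefolded keyword is searched in the text once, matched groups go into a 'satisfied'
-- set, and the result is the sorted set difference of all group names minus it; objective: alternative.


-- ===== PORT A =====
-- The Python dict argument arrives as an insertion-order association list; both
-- ports read it through PySem.Dict.ofList (duplicate keys overwrite, as dict() does).
-- str.casefold is ported as PySem.Str.lower: exact on the ASCII domain Dom_.
def missing_content_expectations_py (text : Option String) (expectation_groups : List (String × List String)) : List String :=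
  match text with
  | none => ["utf8_text_source"]
  | some t =>
    let normalized := PySem.Str.lower t
    let missing := ((PySem.Dict.ofList expectation_groups).items.foldl
      (fun acc p =>
        if !(p.2.any (fun kw => PySem.Str.isIn (PySem.Str.lower kw) normalized)) then acc ++ [p.1]
        else acc) [])
    PySem.List.sorted missing (fun x => x)

-- ===== PORT B =====
-- 'groups_by_kw.setdefault(kw.casefold(), []).append(name)' is Dict.modify with default []
-- (d[k] = d.get(k, []) + [name]); 'set(expectation_groups)' iterates the dict's keys.
def missing_content_expectations_py_alt (text : Option String) (expectation_groups : List (String × List String)) : List String :=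
  match text with
  | none => ["utf8_text_source"]
  | some t =>
    let low := PySem.Str.lower t
    let d := PySem.Dict.ofList expectation_groups
    let idx := d.items.foldl
      (fun idx p => p.2.foldl
        (fun idx kw => idx.modify (PySem.Str.lower kw) [] (fun l => l ++ [p.1])) idx)
      PySem.Dict.empty
    let satisfied := idx.items.foldl
      (fun s q => if PySem.Str.isIn q.1 low then PySem.Set.update s q.2 else s)
      PySem.Set.empty
    PySem.List.sorted (PySem.Set.diff (PySem.Set.ofList d.keys) satisfied) (fun x => x)

-- ===== PRECONDITION & SPEC =====
def Spec_missing_content_expectations_py (text : Option String) (expectation_groups : List (String × List String)) (out : List String) : Prop := out = missing_content_expectations_py_alt text expectation_groups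
instance (text : Option String) (expectation_groups : List (String × List String)) (out : List String) : Decidable (Spec_missing_content_expectations_py text expectation_groups out) := by unfold Spec_missing_content_expectations_py; infer_instance

-- ===== CLAIM (what is proved, stated in full; the proofs are below) =====
def Claim_equal_missing_content_expectations_py : Prop := ∀ (text : Option String) (expectation_groups : List (String × List String)), Dom_missing_content_expectations_py text expectation_groups → Spec_missing_content_expectations_py text expectation_groups (missing_content_expectations_py text expectation_groups)

-- ===== LEMMAS AND PROOFS =====

-- not-any keyword matches = all keywords absent
theorem pv_not_any_all (kws : List String) (f : String → Bool) :
    (!(kws.any f)) = kws.all (fun kw => !(f kw)) := by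
  induction kws with
  | nil => rfl
  | cons k ks ih => simp [List.any_cons, List.all_cons, ← ih]

-- A's loop over items, expressed as a filter over the dict's keys
theorem pv_missing_eq_filter_keys (d : PySem.Dict String (List String)) (hnd : d.keys.Nodup)
    (p : String → Bool) :
    (d.items.foldl (fun acc q => if !(q.2.any p) then acc ++ [q.1] else acc) []) =
      d.keys.filter (fun name => (d.getD name []).all (fun kw => !(p kw))) := by
  rw [PySem.List.foldl_append_if (fun q => !(q.2.any p)) Prod.fst d.items []]
  have hcongr : d.items.filter (fun q => !(q.2.any p)) =
      d.items.filter (fun q => (d.getD q.1 []).all (fun kw => !(p kw))) := by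
    apply List.filter_congr
    intro q hq
    have hget : d.get? q.1 = some q.2 := PySem.Dict.get?_of_mem_items d ((Prod.mk.eta (p := q)) ▸ hq) hnd
    rw [PySem.Dict.getD_eq_get?_getD, hget, Option.getD_some, pv_not_any_all]
  rw [List.nil_append, hcongr]
  have : d.keys = d.items.map Prod.fst := rfl
  rw [this, List.filter_map]
  rfl

-- the 'satisfied' loop: membership in the accumulated set
theorem pv_mem_satisfied (l : List (String × List String)) (p : String × List String → Bool) (s : PySem.Set String) (n : String) :
    n ∈ l.foldl (fun s q => if p q then PySem.Set.update s q.2 else s) s ↔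
      n ∈ s ∨ ∃ q ∈ l, p q = true ∧ n ∈ q.2 := by
  induction l generalizing s with
  | nil => simp
  | cons q l ih =>
    simp only [List.foldl_cons]
    by_cases hp : p q = true
    · rw [if_pos hp, ih]
      simp only [PySem.Set.mem_update, List.mem_cons]
      constructor
      · rintro (⟨h | h⟩ | ⟨r, hr, hpr, hnr⟩)
        · exact Or.inl h
        · exact Or.inr ⟨q, Or.inl rfl, hp, h⟩
        · exact Or.inr ⟨r, Or.inr hr, hpr, hnr⟩
      · rintro (h | ⟨r, (rfl | hr), hpr, hnr⟩)
        · exact Or.inl (Or.inl h)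
        · exact Or.inl (Or.inr hnr)
        · exact Or.inr ⟨r, hr, hpr, hnr⟩
    · rw [if_neg hp, ih]
      simp only [List.mem_cons]
      constructor
      · rintro (h | ⟨r, hr, hpr, hnr⟩)
        · exact Or.inl h
        · exact Or.inr ⟨r, Or.inr hr, hpr, hnr⟩
      · rintro (h | ⟨r, (rfl | hr), hpr, hnr⟩)
        · exact Or.inl h
        · exact absurd hpr hp
        · exact Or.inr ⟨r, hr, hpr, hnr⟩

-- the inverted index: what each bucket holds
theorem pv_idx_getD (l : List (String × List String)) (c : String) :
    (l.foldl
      (fun idx p => p.2.foldl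
        (fun idx kw => idx.modify (PySem.Str.lower kw) [] (fun acc => acc ++ [p.1])) idx)
      (PySem.Dict.empty : PySem.Dict String (List String))).getD c [] =
      ((l.flatMap (fun p => p.2.map (fun kw => (PySem.Str.lower kw, p.1)))).filter
        (fun pr => pr.1 == c)).map (·.2) := by
  have h : ∀ (d0 : PySem.Dict String (List String)),
      (l.foldl
        (fun idx p => p.2.foldl
          (fun idx kw => idx.modify (PySem.Str.lower kw) [] (fun acc => acc ++ [p.1])) idx) d0) =
      ((l.flatMap (fun p => p.2.map (fun kw => (PySem.Str.lower kw, p.1)))).foldl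
        (fun d pr => d.modify pr.1 [] (fun acc => acc ++ [pr.2])) d0) := by
    induction l with
    | nil => intro d0; rfl
    | cons p l ih =>
      intro d0
      simp only [List.foldl_cons, List.flatMap_cons, List.foldl_append, ih, List.foldl_map]
  rw [h, PySem.Dict.getD_foldl_modify_append, PySem.Dict.getD_empty, List.nil_append]

-- nodup keys of the inverted index
theorem pv_idx_nodup (l : List (String × List String)) :
    (l.foldl
      (fun idx p => p.2.foldl
        (fun idx kw => idx.modify (PySem.Str.lower kw) [] (fun acc => acc ++ [p.1])) idx)
      (PySem.Dict.empty : PySem.Dict String (List String))).keys.Nodup := by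
  have h : ∀ (d0 : PySem.Dict String (List String)), d0.keys.Nodup →
      (l.foldl
        (fun idx p => p.2.foldl
          (fun idx kw => idx.modify (PySem.Str.lower kw) [] (fun acc => acc ++ [p.1])) idx) d0).keys.Nodup := by
    induction l with
    | nil => intro d0 h0; exact h0
    | cons p l ih =>
      intro d0 h0
      exact ih _ (PySem.Dict.nodup_keys_foldl_modify_key p.2 (fun kw => PySem.Str.lower kw) []
        (fun _ _ acc => acc ++ [p.1]) d0 h0)
  exact h _ PySem.Dict.nodup_keys_empty

-- a name is 'satisfied' iff one of its own keywords matches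
theorem pv_satisfied_iff (d : PySem.Dict String (List String)) (hnd : d.keys.Nodup)
    (low : String) (n : String) (hn : n ∈ d.keys) :
    (n ∈ ((d.items.foldl
        (fun idx p => p.2.foldl
          (fun idx kw => idx.modify (PySem.Str.lower kw) [] (fun acc => acc ++ [p.1])) idx)
        (PySem.Dict.empty : PySem.Dict String (List String))).items.foldl
      (fun s q => if PySem.Str.isIn q.1 low then PySem.Set.update s q.2 else s)
      (PySem.Set.empty : PySem.Set String))) ↔
      ∃ kw ∈ d.getD n [], PySem.Str.isIn (PySem.Str.lower kw) low = true := by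
  set idx := (d.items.foldl
        (fun idx p => p.2.foldl
          (fun idx kw => idx.modify (PySem.Str.lower kw) [] (fun acc => acc ++ [p.1])) idx)
        (PySem.Dict.empty : PySem.Dict String (List String))) with hidx
  have hidxnd : idx.keys.Nodup := pv_idx_nodup d.items
  rw [pv_mem_satisfied idx.items (fun q => PySem.Str.isIn q.1 low)]
  simp only [PySem.Set.empty, List.not_mem_nil, false_or]
  constructor
  · rintro ⟨q, hq, hpq, hnq⟩
    have hget : idx.getD q.1 [] = q.2 :=
      PySem.Dict.getD_of_mem_items idx ((Prod.mk.eta (p := q)) ▸ hq) hidxnd []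
    have hmem' : n ∈ idx.getD q.1 [] := hget ▸ hnq
    rw [hidx, pv_idx_getD] at hmem'
    simp only [List.mem_map, List.mem_filter, List.mem_flatMap, List.mem_map] at hmem'
    obtain ⟨pr, ⟨⟨p, hp, kw, hkw, hpr⟩, hc⟩, hprn⟩ := hmem'
    subst hpr
    simp only [beq_iff_eq] at hc
    have hget2 : d.get? p.1 = some p.2 := PySem.Dict.get?_of_mem_items d ((Prod.mk.eta (p := p)) ▸ hp) hnd
    have hpn : p.1 = n := hprn
    refine ⟨kw, ?_, ?_⟩
    · rw [← hpn, PySem.Dict.getD_eq_get?_getD, hget2]; exact hkw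
    · rw [hc]; exact hpq
  · rintro ⟨kw, hkw, hmatch⟩
    have hbucket : n ∈ idx.getD (PySem.Str.lower kw) [] := by
      rw [hidx, pv_idx_getD]
      simp only [List.mem_map, List.mem_filter, List.mem_flatMap, List.mem_map]
      obtain ⟨v, hv⟩ : ∃ v, d.get? n = some v := by
        rcases h : d.get? n with _ | v
        · exact absurd ((PySem.Dict.get?_eq_none_iff_not_mem_keys d n).mp h) (by simp [hn])
        · exact ⟨v, rfl⟩
      have hmem : (n, v) ∈ d.items := PySem.Dict.mem_items_of_get?_eq_some d hv
      have hvd : d.getD n [] = v := by rw [PySem.Dict.getD_eq_get?_getD, hv]; rfl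
      exact ⟨(PySem.Str.lower kw, n), ⟨⟨(n, v), hmem, kw, hvd ▸ hkw, rfl⟩, by simp⟩, rfl⟩
    have hne : idx.getD (PySem.Str.lower kw) [] ≠ [] := by
      intro h; rw [h] at hbucket; exact List.not_mem_nil hbucket
    obtain ⟨v, hv⟩ : ∃ v, idx.get? (PySem.Str.lower kw) = some v := by
      rcases h : idx.get? (PySem.Str.lower kw) with _ | v
      · exact absurd (PySem.Dict.getD_eq_get?_getD idx (PySem.Str.lower kw) [] |>.trans (by rw [h]; rfl)) hne
      · exact ⟨v, rfl⟩
    have hvd : idx.getD (PySem.Str.lower kw) [] = v := by rw [PySem.Dict.getD_eq_get?_getD, hv]; rfl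
    exact ⟨(PySem.Str.lower kw, v), PySem.Dict.mem_items_of_get?_eq_some idx hv, hmatch, hvd ▸ hbucket⟩

-- ===== VERDICT (by name: the statement is the Claim_ definition above) =====
theorem missing_content_expectations_py_spec : Claim_equal_missing_content_expectations_py := by
  intro text egs _
  unfold Spec_missing_content_expectations_py
  cases text with
  | none => rfl
  | some t =>
    unfold missing_content_expectations_py missing_content_expectations_py_alt
    simp only
    set d := PySem.Dict.ofList egs with hd
    have hnd : d.keys.Nodup := PySem.Dict.nodup_keys_ofList egs
    set low := PySem.Str.lower t with hlow
    set sat := ((d.items.foldl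
        (fun idx p => p.2.foldl
          (fun idx kw => idx.modify (PySem.Str.lower kw) [] (fun l => l ++ [p.1])) idx)
        (PySem.Dict.empty : PySem.Dict String (List String))).items.foldl
      (fun s q => if PySem.Str.isIn q.1 low then PySem.Set.update s q.2 else s)
      (PySem.Set.empty : PySem.Set String)) with hsat
    rw [pv_missing_eq_filter_keys d hnd (fun kw => PySem.Str.isIn (PySem.Str.lower kw) low)]
    congr 1
    rw [PySem.Set.ofList_eq_self_of_nodup d.keys hnd]
    have hdiff : ∀ (s txs : List String), PySem.Set.diff s txs = s.filter (fun x => !(PySem.Set.contains txs x)) := by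
      intro s txs; rfl
    rw [hdiff]
    apply List.filter_congr
    intro n hn
    have hmemiff : (PySem.Set.contains sat n = true) ↔
        (∃ kw ∈ d.getD n [], PySem.Str.isIn (PySem.Str.lower kw) low = true) :=
      (PySem.Set.contains_iff sat n).trans (hsat ▸ pv_satisfied_iff d hnd low n hn)
    rcases hc : PySem.Set.contains sat n with _ | _
    · simp only [Bool.not_false]
      rw [List.all_eq_true]
      intro kw hkw
      by_contra hne
      have hcon : sat.contains n = true := hmemiff.mpr ⟨kw, hkw, by simpa using hne⟩
      rw [hc] at hcon
      exact Bool.false_ne_true hcon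
    · simp only [Bool.not_true]
      rw [List.all_eq_false]
      obtain ⟨kw, hkw, hm⟩ := hmemiff.mp hc
      exact ⟨kw, hkw, by simpa using hm⟩
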